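-- pv_equiv track=rewrite | github.com/thealper2/codewars-solutions | 7-kyu/max_sum_between_two_negatives.py | max_sum_between_two_negatives
-- ===== SOURCE A (Python) =====
-- def max_sum_between_two_negatives(arr):
--     negatives = []
--     for i, num in enumerate(arr):
--         if num < 0:
--             negatives.append(i)
--
--     if len(negatives) < 2:
--         return -1
--
--     max_sum = -1
--     n = len(negatives)
--     for i in range(n - 1):
--         start = negatives[i] + 1
--         end = negatives[i+1]
--         current_sum = 0
--         for j in range(start, end):
--             if arr[j] >= 0:
--                 current_sum += arr[j]
--
--         if current_sum > max_sum:
--             max_sum = current_sum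
--
--     return max_sum
-- ===== SOURCE B (Python) =====
-- def max_sum_between_two_negatives(arr):
--     max_sum = -1
--     current = 0
--     seen_negative = False
--     for num in arr:
--         if num < 0:
--             if seen_negative and current > max_sum:
--                 max_sum = current
--             seen_negative = True
--             current = 0
--         elif num >= 0:
--             current += num
--     return max_sum
-- ===== Notes on version B (the rewrite author's own statement) =====
-- stated objective: simpler
-- what changed: Replaced the negatives-index list plus nested index loops with a single pass over arr maintaining a running segment sum, a seen-negative flag and the best sum so far.
import Mathlib
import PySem

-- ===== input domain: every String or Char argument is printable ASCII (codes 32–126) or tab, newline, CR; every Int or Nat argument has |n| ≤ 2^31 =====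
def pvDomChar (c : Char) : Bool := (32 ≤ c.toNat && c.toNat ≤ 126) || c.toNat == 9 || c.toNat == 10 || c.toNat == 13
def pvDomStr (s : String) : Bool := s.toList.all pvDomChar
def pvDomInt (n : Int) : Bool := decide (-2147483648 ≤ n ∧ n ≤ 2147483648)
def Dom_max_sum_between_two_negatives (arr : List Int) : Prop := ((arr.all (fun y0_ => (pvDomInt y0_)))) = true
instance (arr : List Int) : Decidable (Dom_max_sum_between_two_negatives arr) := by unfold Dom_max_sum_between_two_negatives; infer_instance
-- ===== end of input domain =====

-- B replaces A's negatives-index list and nested index loops with one pass keeping a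
-- running segment sum and a seen-negative flag (objective: simpler).

-- ===== PORT A =====
def max_sum_between_two_negatives (arr : List Int) : Int :=
  let negatives := (PySem.List.enumerate arr).foldl
    (fun acc inum => if inum.2 < 0 then acc ++ [inum.1] else acc) []
  if negatives.length < 2 then -1
  else
    let n : Int := negatives.length
    (PySem.List.pyRange 0 (n - 1) 1).foldl (fun max_sum i =>
      let start := PySem.List.pyGetD negatives i 0 + 1
      let stop := PySem.List.pyGetD negatives (i + 1) 0
      let current_sum := (PySem.List.pyRange start stop 1).foldl (fun cs j =>
        if PySem.List.pyGetD arr j 0 ≥ 0 then cs + PySem.List.pyGetD arr j 0 else cs) 0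
      if current_sum > max_sum then current_sum else max_sum) (-1)

-- ===== PORT B =====
def max_sum_between_two_negatives_alt (arr : List Int) : Int :=
  (arr.foldl (fun (st : Int × Int × Bool) num =>
    if num < 0 then
      (if st.2.2 ∧ st.2.1 > st.1 then st.2.1 else st.1, 0, true)
    else if num ≥ 0 then
      (st.1, st.2.1 + num, st.2.2)
    else st) (-1, 0, false)).1

-- ===== PRECONDITION & SPEC =====
def Spec_max_sum_between_two_negatives (arr : List Int) (out : Int) : Prop := out = max_sum_between_two_negatives_alt arr
instance (arr : List Int) (out : Int) : Decidable (Spec_max_sum_between_two_negatives arr out) := by unfold Spec_max_sum_between_two_negatives; infer_instance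

-- ===== CLAIM (what is proved, stated in full; the proofs are below) =====
def Claim_equal_max_sum_between_two_negatives : Prop := ∀ (arr : List Int), Dom_max_sum_between_two_negatives arr → Spec_max_sum_between_two_negatives arr (max_sum_between_two_negatives arr)

-- ===== LEMMAS AND PROOFS =====

-- indices (from offset s) of the negative entries
def pvNegIdx : List Int → Int → List Int
  | [], _ => []
  | x :: xs, s => if x < 0 then s :: pvNegIdx xs (s + 1) else pvNegIdx xs (s + 1)

-- completed segment sums once a negative has been seen, with c accumulated so far
def pvRuns : List Int → Int → List Int
  | [], _ => []
  | x :: xs, c => if x < 0 then c :: pvRuns xs 0 else pvRuns xs (c + x)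

-- all segment sums between consecutive negatives of the list
def pvSegs : List Int → List Int
  | [] => []
  | x :: xs => if x < 0 then pvRuns xs 0 else pvSegs xs

def pvMax' (m v : Int) : Int := if v > m then v else m

def pvSumNN (l : List Int) : Int := l.foldl (fun cs v => if v ≥ 0 then cs + v else cs) 0

def pvInner (arr : List Int) (p q : Int) : Int :=
  (PySem.List.pyRange (p + 1) q 1).foldl (fun cs j =>
    if PySem.List.pyGetD arr j 0 ≥ 0 then cs + PySem.List.pyGetD arr j 0 else cs) 0

def pvSlice (arr : List Int) (a b : Int) : List Int :=
  (arr.drop a.toNat).take (b - a).toNat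

theorem pvNegIdx_foldl (xs : List Int) (s : Int) (acc : List Int) :
    (PySem.List.enumerate xs s).foldl
      (fun acc inum => if inum.2 < 0 then acc ++ [inum.1] else acc) acc
      = acc ++ pvNegIdx xs s := by
  induction xs generalizing s acc with
  | nil => simp [PySem.List.enumerate_nil, pvNegIdx]
  | cons x t ih =>
      rw [PySem.List.enumerate_cons]
      simp only [List.foldl_cons, pvNegIdx]
      by_cases h : x < 0 <;> simp [h, ih, List.append_assoc]

theorem pvSumNN_append_nonneg (w : List Int) (x : Int) (hx : 0 ≤ x) :
    pvSumNN (w ++ [x]) = pvSumNN w + x := by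
  unfold pvSumNN
  rw [List.foldl_append]
  simp [hx]

theorem pvInner_eq_slice (arr : List Int) (p q : Int)
    (hp : 0 ≤ p + 1) (hpq : p + 1 ≤ q) (hq : q ≤ (arr.length : Int)) :
    pvInner arr p q = pvSumNN (pvSlice arr (p + 1) q) := by
  have hmap : (PySem.List.pyRange (p+1) ((arr.length : Int)) 1).map
      (fun j => PySem.List.pyGetD arr j 0) = arr.drop (p+1).toNat :=
    PySem.List.map_pyGetD_pyRange' arr 0 hp
  rw [PySem.List.pyRange_one_append (p+1) q (arr.length : Int) hpq hq] at hmap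
  rw [List.map_append] at hmap
  have hlen : ((PySem.List.pyRange (p+1) q 1).map (fun j => PySem.List.pyGetD arr j 0)).length
      = (q - (p+1)).toNat := by
    simp [PySem.List.length_pyRange_one]
  have htake : (PySem.List.pyRange (p+1) q 1).map (fun j => PySem.List.pyGetD arr j 0)
      = (arr.drop (p+1).toNat).take (q - (p+1)).toNat := by
    rw [← hlen, ← hmap, List.take_left]
  unfold pvInner pvSumNN pvSlice
  rw [← htake, List.foldl_map]

theorem pvSlice_snoc (arr : List Int) (a b : Int) (x : Int)
    (ha : 0 ≤ a) (hab : a ≤ b) (hb : arr.drop b.toNat = x :: (arr.drop (b+1).toNat)) :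
    pvSlice arr a (b + 1) = pvSlice arr a b ++ [x] := by
  have hblen : b.toNat < arr.length := by
    by_contra h
    rw [List.drop_eq_nil_of_le (by omega)] at hb
    exact absurd hb (by simp)
  have hget : arr[b.toNat]? = some x := by
    have h0 : (arr.drop b.toNat)[0]? = arr[b.toNat + 0]? := List.getElem?_drop
    rw [hb] at h0
    simpa using h0.symm
  have h1 : (b + 1 - a).toNat = (b - a).toNat + 1 := by omega
  unfold pvSlice
  rw [h1, List.take_add_one]
  congr 1
  have h2 : (arr.drop a.toNat)[(b - a).toNat]? = arr[a.toNat + (b - a).toNat]? :=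
    List.getElem?_drop
  rw [h2]
  have h3 : a.toNat + (b - a).toNat = b.toNat := by omega
  rw [h3, hget]
  rfl

-- ===== B-side characterisation =====

def pvStep (st : Int × Int × Bool) (num : Int) : Int × Int × Bool :=
  if num < 0 then
    (if st.2.2 ∧ st.2.1 > st.1 then st.2.1 else st.1, 0, true)
  else if num ≥ 0 then
    (st.1, st.2.1 + num, st.2.2)
  else st

theorem pvB_true (l : List Int) (m c : Int) :
    (l.foldl pvStep (m, c, true)).1 = (pvRuns l c).foldl pvMax' m := by
  induction l generalizing m c with
  | nil => simp [pvRuns]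
  | cons x t ih =>
      simp only [List.foldl_cons, pvStep, pvRuns]
      by_cases h : x < 0
      · simp only [h, if_pos]
        rw [ih]
        simp [pvMax']
      · have h' : x ≥ 0 := by omega
        simp [h, h', ih]

theorem pvB_false (l : List Int) (m c : Int) :
    (l.foldl pvStep (m, c, false)).1 = (pvSegs l).foldl pvMax' m := by
  induction l generalizing m c with
  | nil => simp [pvSegs]
  | cons x t ih =>
      simp only [List.foldl_cons, pvStep, pvSegs]
      by_cases h : x < 0
      · simp only [h, if_pos]
        have : ((if (false : Bool) ∧ c > m then c else m), (0:Int), true) = (m, (0:Int), true) := by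
          simp
        rw [this, pvB_true]
      · have h' : x ≥ 0 := by omega
        simp [h, h', ih]

theorem pvAlt_eq_segs (arr : List Int) :
    max_sum_between_two_negatives_alt arr = (pvSegs arr).foldl pvMax' (-1) := by
  unfold max_sum_between_two_negatives_alt
  exact pvB_false arr (-1) 0

-- ===== A-side characterisation =====

def pvF (m : Int) (p : Int × Int) (arr : List Int) : Int := pvMax' m (pvInner arr p.1 p.2)

-- range-indexed pair fold equals fold over adjacent pairs (Nat-index version)
theorem pvPairsFoldNat (G : Int → Int → Int → Int) (L : List Int) (init : Int) :
    (List.range (L.length - 1)).foldl (fun m k => G m (L.getD k 0) (L.getD (k+1) 0)) init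
      = (L.zip L.tail).foldl (fun m p => G m p.1 p.2) init := by
  induction L generalizing init with
  | nil => simp
  | cons x t ih =>
      cases t with
      | nil => simp
      | cons y r =>
          have h1 : (x :: y :: r).length - 1 = r.length + 1 := by simp
          rw [h1, List.range_succ_eq_map, List.foldl_cons, List.foldl_map]
          have h2 : (List.range r.length).foldl
              (fun m k => G m ((x :: y :: r).getD k.succ 0) ((x :: y :: r).getD (k.succ + 1) 0))
              (G init ((x :: y :: r).getD 0 0) ((x :: y :: r).getD 1 0))
              = (List.range r.length).foldl
              (fun m k => G m ((y :: r).getD k 0) ((y :: r).getD (k+1) 0)) (G init x y) := by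
            apply List.foldl_ext
            intro a b _
            simp
          rw [h2]
          have h3 : r.length = (y :: r).length - 1 := by simp
          rw [h3, ih]
          have h4 : (x :: y :: r).zip (x :: y :: r).tail
              = (x, y) :: ((y :: r).zip (y :: r).tail) := by simp
          rw [h4, List.foldl_cons]

-- the Int/pyRange outer fold of A equals the adjacent-pair fold
theorem pvPairsFold (G : Int → Int → Int → Int) (L : List Int) (init : Int) :
    (PySem.List.pyRange 0 ((L.length : Int) - 1) 1).foldl
      (fun m i => G m (PySem.List.pyGetD L i 0) (PySem.List.pyGetD L (i + 1) 0)) init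
      = (L.zip L.tail).foldl (fun m p => G m p.1 p.2) init := by
  rw [PySem.List.pyRange_one, List.foldl_map]
  have hnat : (((L.length : Int) - 1 - 0)).toNat = L.length - 1 := by omega
  rw [hnat, ← pvPairsFoldNat G L init]
  apply List.foldl_ext
  intro a k _
  simp only [zero_add]
  have h2 : ((k : Int) + 1) = (((k+1) : Nat) : Int) := by push_cast; ring
  rw [h2, PySem.List.pyGetD_natCast, PySem.List.pyGetD_natCast]

-- inside a segment: the remaining pair fold equals the fold over pvRuns
theorem pvRunsFold (arr : List Int) (t : List Int) (p s init : Int)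
    (hp : 0 ≤ p) (hps : p + 1 ≤ s) (ht : t = arr.drop s.toNat) :
    ((p :: pvNegIdx t s).zip (pvNegIdx t s)).foldl (fun m q => pvF m q arr) init
      = (pvRuns t (pvSumNN (pvSlice arr (p + 1) s))).foldl pvMax' init := by
  induction t generalizing p s init with
  | nil => simp [pvNegIdx, pvRuns]
  | cons x t' ih =>
      have hs : 0 ≤ s := by omega
      have hlen : s.toNat < arr.length := by
        by_contra h
        rw [List.drop_eq_nil_of_le (by omega)] at ht
        exact absurd ht (by simp)
      have hdrop2 : arr.drop ((s+1).toNat) = t' := by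
        have h1 : (s+1).toNat = s.toNat + 1 := by omega
        rw [h1, ← List.drop_drop, ← ht]
        simp
      have hdrop : arr.drop s.toNat = x :: arr.drop (s+1).toNat := by
        rw [hdrop2, ← ht]
      simp only [pvNegIdx, pvRuns]
      by_cases h : x < 0
      · simp only [h, if_pos]
        simp only [List.zip_cons_cons, List.foldl_cons]
        rw [ih s (s+1) (pvF init (p, s) arr) hs (by omega) hdrop2.symm]
        have hsl : pvSlice arr (s+1) (s+1) = [] := by simp [pvSlice]
        rw [hsl]
        have hinner : pvF init (p, s) arr = pvMax' init (pvSumNN (pvSlice arr (p+1) s)) := by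
          unfold pvF
          rw [pvInner_eq_slice arr p s (by omega) hps (by omega)]
        rw [hinner]
        rfl
      · have h' : 0 ≤ x := by omega
        simp only [h, if_neg, not_false_iff]
        rw [ih p (s+1) init hp (by omega) hdrop2.symm]
        rw [pvSlice_snoc arr (p+1) s x (by omega) (by omega) hdrop,
          pvSumNN_append_nonneg _ _ h']

theorem pvSegsFold (arr : List Int) (t : List Int) (s init : Int)
    (hs : 0 ≤ s) (ht : t = arr.drop s.toNat) :
    ((pvNegIdx t s).zip (pvNegIdx t s).tail).foldl (fun m q => pvF m q arr) init
      = (pvSegs t).foldl pvMax' init := by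
  induction t generalizing s init with
  | nil => simp [pvNegIdx, pvSegs]
  | cons x t' ih =>
      have hlen : s.toNat < arr.length := by
        by_contra h
        rw [List.drop_eq_nil_of_le (by omega)] at ht
        exact absurd ht (by simp)
      have hdrop2 : arr.drop ((s+1).toNat) = t' := by
        have h1 : (s+1).toNat = s.toNat + 1 := by omega
        rw [h1, ← List.drop_drop, ← ht]
        simp
      simp only [pvNegIdx, pvSegs]
      by_cases h : x < 0
      · simp only [h, if_pos]
        rw [List.tail_cons]
        rw [pvRunsFold arr t' s (s+1) init hs (by omega) hdrop2.symm]
        have hsl : pvSlice arr (s+1) (s+1) = [] := by simp [pvSlice]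
        rw [hsl]
        rfl
      · simp only [h, if_neg, not_false_iff]
        exact ih (s+1) init (by omega) hdrop2.symm

theorem pvZipShort (L : List Int) (h : L.length < 2) (F : Int → Int × Int → Int) (init : Int) :
    (L.zip L.tail).foldl F init = init := by
  rcases L with _ | ⟨a, _ | ⟨b, r⟩⟩ <;> simp_all

theorem pvA_eq_pairs (arr : List Int) :
    max_sum_between_two_negatives arr
      = ((pvNegIdx arr 0).zip (pvNegIdx arr 0).tail).foldl (fun m q => pvF m q arr) (-1) := by
  simp only [max_sum_between_two_negatives]
  rw [pvNegIdx_foldl arr 0 []]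
  simp only [List.nil_append]
  by_cases hlen : (pvNegIdx arr 0).length < 2
  · rw [if_pos hlen, pvZipShort _ hlen]
  · rw [if_neg hlen]
    exact pvPairsFold (fun m a b => pvMax' m (pvInner arr a b)) (pvNegIdx arr 0) (-1)

-- ===== VERDICT (by name: the statement is the Claim_ definition above) =====
theorem max_sum_between_two_negatives_spec : Claim_equal_max_sum_between_two_negatives := by
  intro arr _
  unfold Spec_max_sum_between_two_negatives
  rw [pvAlt_eq_segs, pvA_eq_pairs]
  have h0 : pvSegs arr = pvSegs (arr.drop (0 : Int).toNat) := by simp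
  rw [pvSegsFold arr arr 0 (-1) le_rfl (by simp)]
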